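-- pv_equiv track=rewrite | github.com/fermibot/pythonPackages | mathematica/lists_and_arrays.py | Polynacci
-- ===== SOURCE A (Python) =====
-- def Total(_list: list):
--     _total = 0
--     for i in _list:
--         _total += i
--     return _total
--
-- def Polynacci(n: int, base: int):
--     _polynacci = [1]
--     for i in range(0, base):
--         _polynacci.append(2 ** i)
--     if n <= base:
--         return _polynacci[n - 1]
--     elif n > base:
--         _len = len(_polynacci)
--         while _len < n + 1:
--             _polynacci.pop(0)
--             _polynacci.append(Total(_polynacci))
--             _len += 1
--         return _polynacci[-1]
-- ===== SOURCE B (Python) =====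
-- def Polynacci(n: int, base: int):
--     buf = [1] + [2 ** i for i in range(base)]
--     if n <= base:
--         return buf[n - 1]
--     total = sum(buf)
--     last = buf[-1]
--     pos = 0
--     for _ in range(len(buf), n + 1):
--         old = buf[pos]
--         last = total - old
--         buf[pos] = last
--         total += last - old
--         pos += 1
--         if pos == len(buf):
--             pos = 0
--     return last
-- ===== Notes on version B (the rewrite author's own statement) =====
-- stated objective: alternative
-- what changed: Replaces A's pop-front/append-and-resum-the-whole-window loop with a fixed circular buffer and an incrementally maintained running window sum, doing O(1) list operations and two bigint additions per step instead of re-summing the base+1 window.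
import Mathlib
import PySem

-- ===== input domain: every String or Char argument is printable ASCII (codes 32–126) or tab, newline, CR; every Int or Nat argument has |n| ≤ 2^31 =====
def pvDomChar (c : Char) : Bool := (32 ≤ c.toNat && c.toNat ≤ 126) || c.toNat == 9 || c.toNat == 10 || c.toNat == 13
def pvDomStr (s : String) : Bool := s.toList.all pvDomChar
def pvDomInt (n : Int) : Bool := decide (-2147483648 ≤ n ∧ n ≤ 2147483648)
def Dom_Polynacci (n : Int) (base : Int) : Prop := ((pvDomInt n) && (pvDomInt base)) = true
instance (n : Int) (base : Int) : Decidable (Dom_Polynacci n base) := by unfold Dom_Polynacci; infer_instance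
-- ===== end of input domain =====

-- B replaces A's pop-front/re-sum loop by a circular buffer with an incrementally
-- maintained running window sum (objective: alternative algorithm, same measured cost).

-- ===== PORT A =====

-- helper Total(_list): running-total loop
def pyTotal (l : List Int) : Int := l.foldl (fun t i => t + i) 0

-- _polynacci = [1]; for i in range(0, base): _polynacci.append(2 ** i)
def polyInit (base : Int) : List Int :=
  (PySem.List.pyRange 0 base 1).foldl (fun acc i => acc ++ [2 ^ i.toNat]) [1]

-- while _len < n + 1: pop(0); append(Total(rest)); _len += 1
def polyLoopA (l : List Int) (len n : Int) : List Int :=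
  if _h : len < n + 1 then
    polyLoopA (l.drop 1 ++ [pyTotal (l.drop 1)]) (len + 1) n
  else l
termination_by (n + 1 - len).toNat
decreasing_by omega

def Polynacci (n : Int) (base : Int) : Int :=
  let p := polyInit base
  if n ≤ base then
    (PySem.List.pyGet? p (n - 1)).getD 0
  else
    let len : Int := p.length
    let p2 := polyLoopA p len n
    (PySem.List.pyGet? p2 (-1)).getD 0

-- ===== PORT B =====

-- the sliding-window loop: buf is a circular buffer of window values, total their
-- running sum, pos the index of the oldest entry, fuel the remaining iteration count
def polyLoopB (buf : List Int) (total last : Int) (pos : Nat) (fuel : Nat) : Int :=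
  match fuel with
  | 0 => last
  | fuel' + 1 =>
    let old := buf[pos]?.getD 0
    let lst := total - old
    let buf' := buf.set pos lst
    let total' := total + (lst - old)
    let pos' := if pos + 1 = buf.length then 0 else pos + 1
    polyLoopB buf' total' lst pos' fuel'

def Polynacci_alt (n : Int) (base : Int) : Int :=
  let buf := 1 :: (PySem.List.pyRange 0 base 1).map (fun i => 2 ^ i.toNat)
  if n ≤ base then
    (PySem.List.pyGet? buf (n - 1)).getD 0
  else
    let total := buf.foldl (fun t i => t + i) 0
    let last := (PySem.List.pyGet? buf (-1)).getD 0
    polyLoopB buf total last 0 (n + 1 - buf.length).toNat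

-- ===== PRECONDITION & SPEC =====
-- Pre_ excludes exactly the inputs where A raises IndexError (n ≤ base with index
-- n-1 out of range of the seed list); B raises the same IndexError there.
def Pre_Polynacci (n : Int) (base : Int) : Prop := n ≤ base → (0 ≤ base ∧ -base ≤ n)
instance (n : Int) (base : Int) : Decidable (Pre_Polynacci n base) := by unfold Pre_Polynacci; infer_instance
def pvWitness_Polynacci : Int × Int := (7, 3)

def Spec_Polynacci (n : Int) (base : Int) (out : Int) : Prop := out = Polynacci_alt n base
instance (n : Int) (base : Int) (out : Int) : Decidable (Spec_Polynacci n base out) := by unfold Spec_Polynacci; infer_instance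

-- ===== CLAIM (what is proved, stated in full; the proofs are below) =====
def Claim_equal_Polynacci : Prop := ∀ (n : Int) (base : Int), Dom_Polynacci n base → Pre_Polynacci n base → Spec_Polynacci n base (Polynacci n base)

-- ===== LEMMAS AND PROOFS =====

lemma pyTotal_eq_sum (l : List Int) : pyTotal l = l.sum := by
  simp [pyTotal, List.sum_eq_foldl]

lemma foldl_append_singleton_map (f : Int → Int) :
    ∀ (xs : List Int) (init : List Int),
      xs.foldl (fun acc i => acc ++ [f i]) init = init ++ xs.map f := by
  intro xs
  induction xs with
  | nil => intro init; simp
  | cons x xs ih => intro init; simp [List.foldl, ih, List.append_assoc]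

lemma polyInit_eq (base : Int) :
    polyInit base = 1 :: (PySem.List.pyRange 0 base 1).map (fun i => 2 ^ i.toNat) := by
  unfold polyInit
  rw [foldl_append_singleton_map]
  simp

-- main simulation: A's pop-front/resum loop vs B's circular buffer with running sum
lemma loop_sim (k : Nat) :
    ∀ (l buf : List Int) (pos : Nat) (len n : Int),
      pos < buf.length →
      l = buf.drop pos ++ buf.take pos →
      (n + 1 - len).toNat = k →
      (PySem.List.pyGet? (polyLoopA l len n) (-1)).getD 0
        = polyLoopB buf l.sum ((PySem.List.pyGet? l (-1)).getD 0) pos k := by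
  induction k with
  | zero =>
    intro l buf pos len n hpos hrot hk
    rw [polyLoopA]
    have : ¬ len < n + 1 := by omega
    simp [this, polyLoopB]
  | succ k ih =>
    intro l buf pos len n hpos hrot hk
    have hlen : len < n + 1 := by omega
    have hL : 0 < buf.length := by omega
    -- decompose buf at pos
    have hdrop : buf.drop pos = buf[pos] :: buf.drop (pos + 1) :=
      List.drop_eq_getElem_cons hpos
    set old := buf[pos] with hold
    have hl : l = old :: (buf.drop (pos + 1) ++ buf.take pos) := by
      rw [hrot, hdrop]; simp
    set t : List Int := buf.drop (pos + 1) ++ buf.take pos with ht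
    -- the new appended value
    have hnew : pyTotal (l.drop 1) = l.sum - old := by
      rw [hl]; simp [pyTotal_eq_sum]
    -- one A step
    rw [polyLoopA]; simp only [hlen, dite_true]
    -- one B step
    rw [polyLoopB]
    have hgetold : buf[pos]?.getD 0 = old := by
      simp [List.getElem?_eq_getElem hpos, ← hold]
    -- buf.set pos (l.sum - old) with the new pos is a rotation of l'
    have hset : buf.set pos (l.sum - old)
        = buf.take pos ++ (l.sum - old) :: buf.drop (pos + 1) := by
      rw [List.set_eq_take_append_cons_drop, if_pos hpos]
    have hdrop1 : l.drop 1 = t := by rw [hl]; simp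
    rw [hdrop1] at hnew
    have hl' : l.drop 1 ++ [pyTotal (l.drop 1)] = t ++ [l.sum - old] := by
      rw [hdrop1, hnew]
    by_cases hwrap : pos + 1 = buf.length
    · -- wrap to 0
      have htake : buf.drop (pos + 1) = [] := by
        apply List.drop_eq_nil_of_le; omega
      have hrot' : t ++ [l.sum - old]
          = (buf.set pos (l.sum - old)).drop 0 ++ (buf.set pos (l.sum - old)).take 0 := by
        rw [hset, htake, ht, htake]; simp
      have := ih (t ++ [l.sum - old]) (buf.set pos (l.sum - old)) 0 (len + 1) n
        (by simp; omega) hrot' (by omega)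
      rw [hl', hgetold, if_pos hwrap]
      rw [this]
      congr 1
      · rw [hl]; simp [ht]; ring
      · simp [PySem.List.pyGet?_neg_one_append_singleton]
    · -- pos + 1 < buf.length
      have hpos' : pos + 1 < buf.length := by omega
      have hrot' : t ++ [l.sum - old]
          = (buf.set pos (l.sum - old)).drop (pos + 1) ++ (buf.set pos (l.sum - old)).take (pos + 1) := by
        rw [hset]
        have h1 : (buf.take pos ++ (l.sum - old) :: buf.drop (pos + 1)).drop (pos + 1)
            = buf.drop (pos + 1) := by
          rw [List.drop_append]
          simp [List.length_take, Nat.min_eq_left (le_of_lt hpos)]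
        have h2 : (buf.take pos ++ (l.sum - old) :: buf.drop (pos + 1)).take (pos + 1)
            = buf.take pos ++ [l.sum - old] := by
          rw [List.take_append]
          simp [List.length_take, Nat.min_eq_left (le_of_lt hpos)]
        rw [h1, h2, ht]; simp
      have := ih (t ++ [l.sum - old]) (buf.set pos (l.sum - old)) (pos + 1) (len + 1) n
        (by simpa using hpos') hrot' (by omega)
      rw [hl', hgetold, if_neg hwrap]
      rw [this]
      congr 1
      · rw [hl]; simp [ht]; ring
      · simp [PySem.List.pyGet?_neg_one_append_singleton]

-- ===== VERDICT (by name: the statement is the Claim_ definition above) =====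
theorem Polynacci_spec : Claim_equal_Polynacci := by
  intro n base _hdom _hpre
  unfold Spec_Polynacci Polynacci Polynacci_alt
  rw [polyInit_eq]
  set buf : List Int := 1 :: (PySem.List.pyRange 0 base 1).map (fun i => 2 ^ i.toNat) with hbuf
  by_cases hnb : n ≤ base
  · simp [hnb]
  · simp only [if_neg hnb]
    have hL : 0 < buf.length := by simp [hbuf]
    have := loop_sim (n + 1 - (buf.length : Int)).toNat buf buf 0 (buf.length : Int) n hL
      (by simp) rfl
    rw [this]
    congr 1
    simp [List.sum_eq_foldl]
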